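-- pv_equiv track=rewrite | github.com/23andMe/bonsaitree | bonsaitree/v3/pedigrees.py | get_subdict
-- ===== SOURCE A (Python) =====
-- import copy
--
-- def get_subdict(
--     dct : dict[int, dict[int, int]],
--     node : int,
-- ):
--     """
--     If dct is an "up" node dict, get
--     the cone above node.
--
--     If dct is a "down" node dict, get
--     the descendant cone below node.
--
--     Args:
--         dct: Node dict of the form
--                    {id : {parent/child1 : deg1, parent/child2 : deg2, ...}, ...}
--         node: int node for whom we want to extract the subdict
--
--     Returns:
--         sub_dct: Dict of the form
--                   {id : {parent/child1 : deg1, parent/child2 : deg2, ...}, ...}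
--                   with node as the root and only containing
--                   nodes above/below node.
--     """
--     if node not in dct:
--         return {}
--
--     sub_dct = {}
--     sub_dct[node] = copy.deepcopy(dct[node])
--
--     for n in dct[node]:
--         n_dct = get_subdict(dct, n)
--         if n_dct:
--             sub_dct.update(n_dct)
--
--     return sub_dct
-- ===== SOURCE B (Python) =====
-- def get_subdict(
--     dct : dict[int, dict[int, int]],
--     node : int,
-- ):
--     """Iterative DFS with an explicit stack; the output dict doubles as the
--     visited set, so each reachable node is expanded exactly once."""
--     sub_dct = {}
--     stack = [node]
--     while stack:
--         n = stack.pop()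
--         if n not in dct or n in sub_dct:
--             continue
--         row = dct[n]
--         sub_dct[n] = dict(row)
--         stack.extend(reversed(list(row)))
--     return sub_dct
-- ===== Notes on version B (the rewrite author's own statement) =====
-- stated objective: faster
-- what changed: A re-expands every child cone recursively and merges the dicts, recomputing shared nodes exponentially often; B replaces the recursion entirely by an iterative while-loop over an explicit stack, with the output dict as the visited set, so each reachable node is expanded exactly once.
import Mathlib
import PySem

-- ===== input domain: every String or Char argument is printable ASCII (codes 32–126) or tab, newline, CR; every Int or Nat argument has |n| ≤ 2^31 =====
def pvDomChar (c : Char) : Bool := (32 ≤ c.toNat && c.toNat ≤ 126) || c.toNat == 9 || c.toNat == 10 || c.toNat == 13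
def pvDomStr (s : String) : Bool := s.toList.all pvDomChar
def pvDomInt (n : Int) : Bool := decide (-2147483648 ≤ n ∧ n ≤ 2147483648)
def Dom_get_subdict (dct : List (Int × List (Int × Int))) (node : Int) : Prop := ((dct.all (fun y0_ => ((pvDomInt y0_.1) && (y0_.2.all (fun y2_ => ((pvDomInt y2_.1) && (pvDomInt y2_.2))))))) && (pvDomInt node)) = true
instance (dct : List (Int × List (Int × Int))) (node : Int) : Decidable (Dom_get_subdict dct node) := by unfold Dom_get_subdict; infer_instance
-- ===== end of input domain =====

-- B replaces A's exponential re-expansion of shared nodes (recursion with dict-union) by an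
-- iterative explicit-stack DFS whose output dict doubles as the visited set, expanding each
-- reachable node once; return values agree on Pre_ (no cycle reachable from node — there A
-- raises RecursionError while B still returns).

-- ===== PORT A =====
-- A's recursion (which Python bounds only by the recursion limit) is made total by a fuel
-- parameter; Pre_get_subdict guarantees dct.length + 1 levels are never exhausted.
def get_subdictFuel (dct : List (Int × List (Int × Int))) : Nat → Int → PySem.Dict Int (List (Int × Int))
  | 0, _ => PySem.Dict.empty
  | f+1, node =>
    match (PySem.Dict.mk dct).get? node with
    | none => PySem.Dict.empty
    | some row =>
      row.foldl
        (fun acc p =>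
          let n_dct := get_subdictFuel dct f p.1
          if n_dct.items.isEmpty then acc else acc.update n_dct.items)
        (PySem.Dict.empty.insert node row)

def get_subdict (dct : List (Int × List (Int × Int))) (node : Int) : List (Int × List (Int × Int)) :=
  (get_subdictFuel dct (dct.length + 1) node).items

-- ===== PORT B =====
-- transliteration of Source B: a while-loop over an explicit stack ('stack.pop()' takes the last
-- element, and 'stack.extend(reversed(list(row)))' pushes the children so that they pop in
-- forward order — modelling the stack with its TOP at the list head, the new stack is
-- row-keys ++ rest).  The while-loop is ported as fuel recursion purely for totality:
-- subFuel bounds the iteration count (one initial push plus at most one push-batch per entry).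
def subFuel (dct : List (Int × List (Int × Int))) : Nat :=
  (dct.map (fun p => p.2.length + 1)).sum + 2

def subStack (dct : List (Int × List (Int × Int))) :
    Nat → List Int → PySem.Dict Int (List (Int × Int)) → PySem.Dict Int (List (Int × Int))
  | 0, _, acc => acc
  | _+1, [], acc => acc
  | f+1, n :: stack, acc =>
    match (PySem.Dict.mk dct).get? n with
    | none => subStack dct f stack acc
    | some row =>
      if acc.contains n then subStack dct f stack acc
      else subStack dct f (row.map Prod.fst ++ stack) (acc.insert n row)

def get_subdict_alt (dct : List (Int × List (Int × Int))) (node : Int) : List (Int × List (Int × Int)) :=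
  (subStack dct (subFuel dct) [node] PySem.Dict.empty).items

-- ===== PRECONDITION & SPEC =====
-- helpers for Pre_: the children of a node, and reachability as a bounded expansion
def subChildren (dct : List (Int × List (Int × Int))) (k : Int) : List Int :=
  match (PySem.Dict.mk dct).get? k with
  | some row => row.map Prod.fst
  | none => []

def subIsKey (dct : List (Int × List (Int × Int))) (k : Int) : Bool :=
  ((PySem.Dict.mk dct).get? k).isSome

def subExpand (dct : List (Int × List (Int × Int))) (s : List Int) : List Int :=
  s ++ s.flatMap (fun k => subChildren dct k)

def subReach (dct : List (Int × List (Int × Int))) (s : List Int) : List Int :=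
  (subExpand dct)^[dct.length + 2] s

-- Pre_ excludes exactly the inputs with a directed cycle reachable from node, where Python's A
-- exceeds the recursion limit and raises RecursionError instead of returning.
def Pre_get_subdict (dct : List (Int × List (Int × Int))) (node : Int) : Prop :=
  ∀ k ∈ subReach dct [node], subIsKey dct k = true → k ∉ subReach dct (subChildren dct k)

instance (dct : List (Int × List (Int × Int))) (node : Int) : Decidable (Pre_get_subdict dct node) := by
  unfold Pre_get_subdict; infer_instance

def pvWitness_get_subdict : (List (Int × List (Int × Int))) × Int := ([(1, [(2, 3)]), (2, [])], 1)

def Spec_get_subdict (dct : List (Int × List (Int × Int))) (node : Int) (out : List (Int × List (Int × Int))) : Prop := out = get_subdict_alt dct node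
instance (dct : List (Int × List (Int × Int))) (node : Int) (out : List (Int × List (Int × Int))) : Decidable (Spec_get_subdict dct node out) := by unfold Spec_get_subdict; infer_instance

-- ===== CLAIM (what is proved, stated in full; the proofs are below) =====
def Claim_equal_get_subdict : Prop := ∀ (dct : List (Int × List (Int × Int))) (node : Int), Dom_get_subdict dct node → Pre_get_subdict dct node → Spec_get_subdict dct node (get_subdict dct node)

-- ===== LEMMAS AND PROOFS =====

-- proof-side bridge: the recursive memoized DFS that subStack simulates step for step
def subVisit (dct : List (Int × List (Int × Int))) : Nat → PySem.Dict Int (List (Int × Int)) → Int → PySem.Dict Int (List (Int × Int))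
  | 0, acc, _ => acc
  | f+1, acc, n =>
    match (PySem.Dict.mk dct).get? n with
    | none => acc
    | some row =>
      if acc.contains n then acc
      else row.foldl (fun a p => subVisit dct f a p.1) (acc.insert n row)

-- ----- reachability: relational form and correspondence with the bounded expansion -----

inductive SubReaches (dct : List (Int × List (Int × Int))) : Int → Int → Prop
  | refl (a : Int) : SubReaches dct a a
  | step {a b c : Int} : SubReaches dct a b → c ∈ subChildren dct b → SubReaches dct a c

theorem subReaches_trans {dct : List (Int × List (Int × Int))} {a b c : Int}
    (h1 : SubReaches dct a b) (h2 : SubReaches dct b c) : SubReaches dct a c := by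
  induction h2 with
  | refl => exact h1
  | step _ hc ih => exact SubReaches.step ih hc

theorem subIsKey_of_mem_children {dct : List (Int × List (Int × Int))} {c k : Int}
    (h : c ∈ subChildren dct k) : subIsKey dct k = true := by
  unfold subChildren at h
  unfold subIsKey
  cases hk : (PySem.Dict.mk dct).get? k with
  | none => rw [hk] at h; simp at h
  | some row => simp

theorem subReaches_head {dct : List (Int × List (Int × Int))} {a x : Int}
    (h : SubReaches dct a x) : x = a ∨ ∃ c ∈ subChildren dct a, SubReaches dct c x := by
  induction h with
  | refl => exact Or.inl rfl
  | step hab hc ih =>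
    rcases ih with rfl | ⟨c', hc', hr⟩
    · exact Or.inr ⟨_, hc, SubReaches.refl _⟩
    · exact Or.inr ⟨c', hc', SubReaches.step hr hc⟩

theorem mem_subExpand_left {dct : List (Int × List (Int × Int))} {s : List Int} {x : Int}
    (h : x ∈ s) : x ∈ subExpand dct s := by
  unfold subExpand; exact List.mem_append_left _ h

theorem mem_subExpand_child {dct : List (Int × List (Int × Int))} {s : List Int} {k c : Int}
    (hk : k ∈ s) (hc : c ∈ subChildren dct k) : c ∈ subExpand dct s := by
  unfold subExpand
  exact List.mem_append_right _ (List.mem_flatMap.mpr ⟨k, hk, hc⟩)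

theorem mem_iter_of_mem {dct : List (Int × List (Int × Int))} {s : List Int} {x : Int}
    (m : Nat) (h : x ∈ s) : x ∈ (subExpand dct)^[m] s := by
  induction m with
  | zero => exact h
  | succ m ih => rw [Function.iterate_succ_apply']; exact mem_subExpand_left ih

theorem iter_le_iter {dct : List (Int × List (Int × Int))} {s : List Int} {x : Int}
    {i j : Nat} (hij : i ≤ j) (h : x ∈ (subExpand dct)^[i] s) : x ∈ (subExpand dct)^[j] s := by
  induction j with
  | zero => simpa [Nat.le_zero.mp hij] using h
  | succ j ih =>
    rcases Nat.lt_or_ge i (j+1) with hlt | hge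
    · rw [Function.iterate_succ_apply']
      exact mem_subExpand_left (ih (Nat.lt_succ_iff.mp hlt))
    · have : i = j + 1 := Nat.le_antisymm hij hge
      subst this; exact h

theorem subIsKey_mem_fst {dct : List (Int × List (Int × Int))} {k : Int}
    (h : subIsKey dct k = true) : k ∈ dct.map Prod.fst := by
  unfold subIsKey PySem.Dict.get? at h
  cases hf : List.find? (fun p => p.1 == k) (PySem.Dict.mk dct).items with
  | none => rw [hf] at h; simp at h
  | some p =>
    have hmem := List.mem_of_find?_eq_some hf
    have hp := List.find?_some hf
    have : p.1 = k := by simpa using hp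
    exact this ▸ List.mem_map.mpr ⟨p, hmem, rfl⟩

theorem subReach_closed {dct : List (Int × List (Int × Int))} {s : List Int} :
    ∀ k ∈ subReach dct s, subIsKey dct k = true →
      ∀ c ∈ subChildren dct k, c ∈ subReach dct s := by
  intro k hk hkey c hc
  classical
  set L := dct.length with hL
  -- the finsets of keys reached after m rounds
  set F : Nat → Finset Int := fun m => (((subExpand dct)^[m] s).filter (fun x => subIsKey dct x)).toFinset with hF
  have hFmono : ∀ m, F m ⊆ F (m+1) := by
    intro m x hx
    simp only [hF, List.mem_toFinset, List.mem_filter] at hx ⊢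
    exact ⟨iter_le_iter (Nat.le_succ m) hx.1, hx.2⟩
  have hFsub : ∀ m, F m ⊆ (dct.map Prod.fst).toFinset := by
    intro m x hx
    simp only [hF, List.mem_toFinset, List.mem_filter] at hx
    exact List.mem_toFinset.mpr (subIsKey_mem_fst hx.2)
  -- some consecutive pair of keysets coincides
  have hstab : ∃ m ≤ L, F (m+1) ⊆ F m := by
    by_contra hno
    push Not at hno
    have hstrict : ∀ m ≤ L, F m ⊂ F (m+1) := fun m hm =>
      HasSubset.Subset.ssubset_of_not_subset (hFmono m) (hno m hm)
    have hcard : ∀ j, j ≤ L + 1 → j ≤ (F j).card := by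
      intro j hj
      induction j with
      | zero => exact Nat.zero_le _
      | succ j ih =>
        have h1 : j ≤ (F j).card := ih (Nat.le_of_succ_le hj)
        have h2 : (F j).card < (F (j+1)).card :=
          Finset.card_lt_card (hstrict j (Nat.lt_succ_iff.mp hj))
        omega
    have h1 : L + 1 ≤ (F (L+1)).card := hcard (L+1) le_rfl
    have h2 : (F (L+1)).card ≤ ((dct.map Prod.fst).toFinset).card :=
      Finset.card_le_card (hFsub (L+1))
    have h3 : ((dct.map Prod.fst).toFinset).card ≤ L := by
      calc ((dct.map Prod.fst).toFinset).card ≤ (dct.map Prod.fst).length := List.toFinset_card_le _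
        _ = L := by simp [hL]
    omega
  rcases hstab with ⟨m, hmL, hFeq⟩
  -- from round m+1 on, nothing new (membership-wise)
  have collapse : ∀ i, ∀ x ∈ (subExpand dct)^[m+1+i] s, x ∈ (subExpand dct)^[m+1] s := by
    intro i
    induction i with
    | zero => intro x hx; exact hx
    | succ i ih =>
      intro x hx
      rw [show m+1+(i+1) = (m+1+i)+1 by omega, Function.iterate_succ_apply'] at hx
      unfold subExpand at hx
      rcases List.mem_append.mp hx with hx | hx
      · exact ih x hx
      · rcases List.mem_flatMap.mp hx with ⟨k', hk', hc'⟩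
        have hk'key : subIsKey dct k' = true := subIsKey_of_mem_children hc'
        have hk'm : k' ∈ (subExpand dct)^[m] s := by
          have : k' ∈ F m := hFeq (by
            simp only [hF, List.mem_toFinset, List.mem_filter]
            exact ⟨ih k' hk', hk'key⟩)
          simp only [hF, List.mem_toFinset, List.mem_filter] at this
          exact this.1
        rw [Function.iterate_succ_apply']
        exact mem_subExpand_child hk'm hc'
  -- now close the original goal
  have hkm : k ∈ (subExpand dct)^[m+1] s := by
    have : L + 2 = m + 1 + (L + 1 - m) := by omega
    exact collapse (L + 1 - m) k (by rw [← this]; exact hk)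
  have hkFm : k ∈ F m := hFeq (by
    simp only [hF, List.mem_toFinset, List.mem_filter]
    exact ⟨hkm, hkey⟩)
  have hkm' : k ∈ (subExpand dct)^[m] s := by
    simp only [hF, List.mem_toFinset, List.mem_filter] at hkFm
    exact hkFm.1
  have hcm : c ∈ (subExpand dct)^[m+1] s := by
    rw [Function.iterate_succ_apply']
    exact mem_subExpand_child hkm' hc
  exact iter_le_iter (by omega) hcm

theorem subReach_complete {dct : List (Int × List (Int × Int))} {s : List Int} {a x : Int}
    (ha : a ∈ s) (h : SubReaches dct a x) : x ∈ subReach dct s := by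
  induction h with
  | refl => exact mem_iter_of_mem _ ha
  | step hab hc ih =>
    exact subReach_closed _ ih (subIsKey_of_mem_children hc) _ hc

theorem pre_noCyc {dct : List (Int × List (Int × Int))} {node : Int}
    (hpre : Pre_get_subdict dct node) :
    ∀ k, SubReaches dct node k → ∀ c ∈ subChildren dct k, ¬ SubReaches dct c k := by
  intro k hk c hc hck
  have h1 : k ∈ subReach dct [node] := subReach_complete (List.mem_singleton_self node) hk
  have h2 : k ∈ subReach dct (subChildren dct k) := subReach_complete hc hck
  exact hpre k h1 (subIsKey_of_mem_children hc) h2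

-- ----- the gray path (current DFS spine) -----

def SubGray (dct : List (Int × List (Int × Int))) (r : Int) : List Int → Int → Prop
  | [], n => n = r
  | g :: gs, n => n ∈ subChildren dct g ∧ SubGray dct r gs g

theorem subGray_reaches_root {dct : List (Int × List (Int × Int))} {r : Int} :
    ∀ (π : List Int) (n : Int), SubGray dct r π n → SubReaches dct r n := by
  intro π
  induction π with
  | nil => intro n h; cases h; exact SubReaches.refl r
  | cons g gs ih => intro n h; exact SubReaches.step (ih g h.2) h.1

theorem subGray_cycle {dct : List (Int × List (Int × Int))} {r : Int} :
    ∀ (π : List Int) (m : Int), SubGray dct r π m → ∀ n ∈ π,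
      ∃ c ∈ subChildren dct n, SubReaches dct c m := by
  intro π
  induction π with
  | nil => intro m _ n hn; cases hn
  | cons g gs ih =>
    intro m h n hn
    rcases List.mem_cons.mp hn with rfl | hn
    · exact ⟨m, h.1, SubReaches.refl m⟩
    · rcases ih g h.2 n hn with ⟨c, hc, hcg⟩
      exact ⟨c, hc, SubReaches.step hcg h.1⟩

theorem subGray_not_mem {dct : List (Int × List (Int × Int))} {node : Int}
    (hpre : Pre_get_subdict dct node) {π : List Int} {n : Int}
    (hg : SubGray dct node π n) : n ∉ π := by
  intro hn
  rcases subGray_cycle π n hg n hn with ⟨c, hc, hcm⟩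
  exact pre_noCyc hpre n (subGray_reaches_root π n hg) c hc hcm

-- ----- invariants of the accumulator -----

def SubCorrect (dct : List (Int × List (Int × Int))) (acc : PySem.Dict Int (List (Int × Int))) : Prop :=
  ∀ k, acc.contains k = true → acc.get? k = (PySem.Dict.mk dct).get? k

def SubClosed (dct : List (Int × List (Int × Int))) (acc : PySem.Dict Int (List (Int × Int))) (π : List Int) : Prop :=
  ∀ k, acc.contains k = true → k ∉ π →
    ∀ x, SubReaches dct k x → subIsKey dct x = true → acc.contains x = true

def subUnvisited (dct : List (Int × List (Int × Int))) (acc : PySem.Dict Int (List (Int × Int))) : Nat :=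
  (((dct.map Prod.fst).toFinset).filter (fun k => acc.contains k = false)).card

theorem subUnvisited_mono {dct : List (Int × List (Int × Int))}
    {acc acc' : PySem.Dict Int (List (Int × Int))}
    (h : ∀ k, acc.contains k = true → acc'.contains k = true) :
    subUnvisited dct acc' ≤ subUnvisited dct acc := by
  apply Finset.card_le_card
  intro x hx
  rcases Finset.mem_filter.mp hx with ⟨hx1, hx2⟩
  refine Finset.mem_filter.mpr ⟨hx1, ?_⟩
  cases hc : acc.contains x with
  | false => rfl
  | true => rw [h x hc] at hx2; cases hx2

theorem subUnvisited_insert {dct : List (Int × List (Int × Int))}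
    {acc : PySem.Dict Int (List (Int × Int))} {n : Int} (row : List (Int × Int))
    (hkey : n ∈ dct.map Prod.fst) (hnc : acc.contains n = false) :
    subUnvisited dct acc = subUnvisited dct (acc.insert n row) + 1 := by
  unfold subUnvisited
  have hset : ((dct.map Prod.fst).toFinset).filter (fun k => (acc.insert n row).contains k = false)
      = (((dct.map Prod.fst).toFinset).filter (fun k => acc.contains k = false)).erase n := by
    ext x
    simp only [Finset.mem_erase, Finset.mem_filter, PySem.Dict.contains_insert]
    constructor
    · intro ⟨h1, h2⟩
      simp only [Bool.or_eq_false_iff, beq_eq_false_iff_ne] at h2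
      exact ⟨h2.1, h1, h2.2⟩
    · intro ⟨hne, h1, h2⟩
      refine ⟨h1, ?_⟩
      simp only [Bool.or_eq_false_iff, beq_eq_false_iff_ne]
      exact ⟨hne, h2⟩
  rw [hset]
  have hmem : n ∈ ((dct.map Prod.fst).toFinset).filter (fun k => acc.contains k = false) :=
    Finset.mem_filter.mpr ⟨List.mem_toFinset.mpr hkey, hnc⟩
  exact (Finset.card_erase_add_one hmem).symm

-- ----- Set-level utilities for the keys computation -----

theorem set_update_add_comm (s t : List Int) (a : Int) :
    PySem.Set.update s (PySem.Set.add t a) = PySem.Set.add (PySem.Set.update s t) a := by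
  by_cases ha : a ∈ t
  · have h1 : PySem.Set.add t a = t := by
      unfold PySem.Set.add
      simp [ha]
    have h2 : PySem.Set.add (PySem.Set.update s t) a = PySem.Set.update s t := by
      unfold PySem.Set.add
      simp [(PySem.Set.mem_update s t a).mpr (Or.inr ha)]
    rw [h1, h2]
  · have h1 : PySem.Set.add t a = t ++ [a] := by
      unfold PySem.Set.add
      simp [ha]
    rw [h1]
    show List.foldl PySem.Set.add s (t ++ [a]) = _
    rw [List.foldl_append]
    rfl

theorem set_update_assoc (l : List Int) : ∀ (s t : List Int),
    PySem.Set.update s (PySem.Set.update t l) = PySem.Set.update (PySem.Set.update s t) l := by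
  induction l with
  | nil => intro s t; simp [PySem.Set.update_nil]
  | cons a l ih =>
    intro s t
    show PySem.Set.update s (PySem.Set.update (PySem.Set.add t a) l)
        = PySem.Set.update (PySem.Set.add (PySem.Set.update s t) a) l
    rw [ih s (PySem.Set.add t a), set_update_add_comm]

theorem set_update_of_subset {s : List Int} : ∀ {t : List Int}, (∀ x ∈ t, x ∈ s) →
    PySem.Set.update s t = s := by
  intro t
  induction t generalizing s with
  | nil => intro _; exact PySem.Set.update_nil s
  | cons a t ih =>
    intro h
    show PySem.Set.update (PySem.Set.add s a) t = s
    have ha : PySem.Set.add s a = s := by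
      unfold PySem.Set.add
      simp [h a List.mem_cons_self]
    rw [ha]
    exact ih (fun x hx => h x (List.mem_cons_of_mem a hx))

-- ----- Dict-level utilities -----

theorem mem_items_update {l : List (Int × List (Int × Int))} :
    ∀ {a : PySem.Dict Int (List (Int × Int))} {p : Int × List (Int × Int)},
      p ∈ (a.update l).items → p ∈ a.items ∨ p ∈ l := by
  induction l with
  | nil => intro a p h; exact Or.inl h
  | cons q l ih =>
    intro a p h
    have h' := ih (a := a.insert q.1 q.2) h
    rcases h' with h' | h'
    · rcases (PySem.Dict.mem_items_insert a q.1 q.2 p).mp h' with rfl | ⟨hp, _⟩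
      · exact Or.inr (List.mem_cons_self)
      · exact Or.inl hp
    · exact Or.inr (List.mem_cons_of_mem q h')

theorem update_get?_or (l : List (Int × List (Int × Int))) (hnd : (l.map Prod.fst).Nodup) :
    ∀ (a : PySem.Dict Int (List (Int × Int))) (k : Int),
      (a.update l).get? k = Option.or ((PySem.Dict.mk l).get? k) (a.get? k) := by
  induction l with
  | nil =>
    intro a k
    show (a.update []).get? k = Option.or ((PySem.Dict.mk []).get? k) (a.get? k)
    have : (PySem.Dict.mk ([] : List (Int × List (Int × Int)))).get? k = none := rfl
    rw [this, Option.none_or]; rfl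
  | cons q l ih =>
    intro a k
    have hnd' : (l.map Prod.fst).Nodup := (List.nodup_cons.mp hnd).2
    have hq : q.1 ∉ l.map Prod.fst := (List.nodup_cons.mp hnd).1
    show ((a.insert q.1 q.2).update l).get? k = _
    rw [ih hnd' (a.insert q.1 q.2) k]
    have hmk : (PySem.Dict.mk (q :: l)).get? k
        = if (q.1 == k) = true then some q.2 else (PySem.Dict.mk l).get? k := by
      have := PySem.Dict.get?_mk_cons q.1 q.2 l k
      simpa using this
    by_cases hk : k = q.1
    · subst hk
      have h1 : (PySem.Dict.mk l).get? q.1 = none := by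
        rw [PySem.Dict.get?_eq_none_iff_not_mem_keys]
        simpa [PySem.Dict.keys] using hq
      rw [h1, PySem.Dict.get?_insert_self, hmk]
      simp
    · rw [PySem.Dict.get?_insert_of_ne a q.2 hk, hmk]
      simp [show (q.1 == k) = false by simpa using fun h => hk h.symm]

theorem update_items_get?_or {x : PySem.Dict Int (List (Int × Int))} (hnd : x.keys.Nodup)
    (a : PySem.Dict Int (List (Int × Int))) (k : Int) :
    (a.update x.items).get? k = Option.or (x.get? k) (a.get? k) := by
  have h := update_get?_or x.items (by simpa [PySem.Dict.keys] using hnd) a k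
  cases x with
  | mk items => exact h

-- ----- facts about port A's recursion -----

theorem gsA_nodup (dct : List (Int × List (Int × Int))) :
    ∀ (f : Nat) (n : Int), (get_subdictFuel dct f n).keys.Nodup := by
  intro f
  induction f with
  | zero => intro n; exact PySem.Dict.nodup_keys_empty
  | succ f ih =>
    intro n
    show (get_subdictFuel dct (f+1) n).keys.Nodup
    simp only [get_subdictFuel]
    cases hrow : (PySem.Dict.mk dct).get? n with
    | none => exact PySem.Dict.nodup_keys_empty
    | some row =>
      have aux : ∀ (ps : List (Int × Int)) (x : PySem.Dict Int (List (Int × Int))),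
          x.keys.Nodup →
          (ps.foldl (fun acc p =>
            if (get_subdictFuel dct f p.1).items.isEmpty then acc
            else acc.update (get_subdictFuel dct f p.1).items) x).keys.Nodup := by
        intro ps
        induction ps with
        | nil => intro x hx; exact hx
        | cons p ps ihp =>
          intro x hx
          refine ihp _ ?_
          by_cases hval : (get_subdictFuel dct f p.1).items.isEmpty
          · simpa [hval] using hx
          · simpa [hval] using PySem.Dict.nodup_keys_update x _ hx
      exact aux row _ (PySem.Dict.nodup_keys_insert _ _ _ PySem.Dict.nodup_keys_empty)

theorem gsA_pairs (dct : List (Int × List (Int × Int))) :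
    ∀ (f : Nat) (n k : Int) (v : List (Int × Int)),
      (k, v) ∈ (get_subdictFuel dct f n).items →
      SubReaches dct n k ∧ (PySem.Dict.mk dct).get? k = some v := by
  intro f
  induction f with
  | zero => intro n k v h; cases h
  | succ f ih =>
    intro n k v h
    rw [show get_subdictFuel dct (f+1) n
        = match (PySem.Dict.mk dct).get? n with
          | none => PySem.Dict.empty
          | some row => row.foldl (fun acc p =>
              if (get_subdictFuel dct f p.1).items.isEmpty then acc
              else acc.update (get_subdictFuel dct f p.1).items)
              (PySem.Dict.empty.insert n row) from by simp only [get_subdictFuel]] at h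
    cases hrow : (PySem.Dict.mk dct).get? n with
    | none => rw [hrow] at h; cases h
    | some row =>
      rw [hrow] at h
      have aux : ∀ (ps : List (Int × Int)) (x : PySem.Dict Int (List (Int × Int))),
          (k, v) ∈ (ps.foldl (fun acc p =>
            if (get_subdictFuel dct f p.1).items.isEmpty then acc
            else acc.update (get_subdictFuel dct f p.1).items) x).items →
          (k, v) ∈ x.items ∨ ∃ p ∈ ps, (k, v) ∈ (get_subdictFuel dct f p.1).items := by
        intro ps
        induction ps with
        | nil => intro x hx; exact Or.inl hx
        | cons p ps ihp =>
          intro x hx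
          simp only [List.foldl_cons] at hx
          rcases ihp _ hx with hx' | ⟨p', hp', hv'⟩
          · by_cases hval : (get_subdictFuel dct f p.1).items.isEmpty
            · rw [if_pos hval] at hx'; exact Or.inl hx'
            · rw [if_neg hval] at hx'
              rcases mem_items_update hx' with h1 | h1
              · exact Or.inl h1
              · exact Or.inr ⟨p, List.mem_cons_self, h1⟩
          · exact Or.inr ⟨p', List.mem_cons_of_mem p hp', hv'⟩
      rcases aux row _ h with h1 | ⟨p, hp, hv⟩
      · have : (k, v) ∈ (PySem.Dict.empty (κ := Int) (ν := List (Int × Int))).items ++ [(n, row)] := by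
          rwa [← PySem.Dict.items_insert_of_not_contains _ row (by rfl)]
        simp only [show (PySem.Dict.empty (κ := Int) (ν := List (Int × Int))).items = [] from rfl,
          List.nil_append, List.mem_singleton] at this
        obtain ⟨hk, hv⟩ := Prod.ext_iff.mp this
        subst hk; subst hv
        exact ⟨SubReaches.refl _, hrow⟩
      · have hchild : p.1 ∈ subChildren dct n := by
          unfold subChildren; rw [hrow]
          exact List.mem_map.mpr ⟨p, hp, rfl⟩
        have hstep : SubReaches dct n p.1 := SubReaches.step (SubReaches.refl n) hchild
        rcases ih p.1 k v hv with ⟨hr, hg⟩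
        exact ⟨subReaches_trans hstep hr, hg⟩

theorem gsA_get?_row {dct : List (Int × List (Int × Int))} {f : Nat} {n k : Int}
    {v : List (Int × Int)} (h : (get_subdictFuel dct f n).get? k = some v) :
    SubReaches dct n k ∧ (PySem.Dict.mk dct).get? k = some v :=
  gsA_pairs dct f n k v (PySem.Dict.mem_items_of_get?_eq_some _ h)

theorem gsA_keys_reach {dct : List (Int × List (Int × Int))} {f : Nat} {n k : Int}
    (h : k ∈ (get_subdictFuel dct f n).keys) :
    SubReaches dct n k ∧ subIsKey dct k = true := by
  rcases List.mem_map.mp h with ⟨p, hp, rfl⟩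
  rcases gsA_pairs dct f n p.1 p.2 hp with ⟨h1, h2⟩
  exact ⟨h1, by unfold subIsKey; rw [h2]; rfl⟩

-- the override-merge of the children results, as seen by get?
def subMerge (dct : List (Int × List (Int × Int))) (f : Nat) (ps : List (Int × Int)) (k : Int) :
    Option (List (Int × Int)) :=
  ps.foldr (fun p o => Option.or o ((get_subdictFuel dct f p.1).get? k)) none

theorem afold_get? (dct : List (Int × List (Int × Int))) (f : Nat) :
    ∀ (ps : List (Int × Int)) (x : PySem.Dict Int (List (Int × Int))) (k : Int),
      (ps.foldl (fun acc p =>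
        if (get_subdictFuel dct f p.1).items.isEmpty then acc
        else acc.update (get_subdictFuel dct f p.1).items) x).get? k
      = Option.or (subMerge dct f ps k) (x.get? k) := by
  intro ps
  induction ps with
  | nil => intro x k; simp [subMerge]
  | cons p ps ih =>
    intro x k
    rw [List.foldl_cons, ih]
    have hcons : subMerge dct f (p :: ps) k
        = Option.or (subMerge dct f ps k) ((get_subdictFuel dct f p.1).get? k) := rfl
    rw [hcons, Option.or_assoc]
    congr 1
    by_cases hval : (get_subdictFuel dct f p.1).items.isEmpty
    · have hnone : (get_subdictFuel dct f p.1).get? k = none := by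
        unfold PySem.Dict.get?
        rw [List.isEmpty_iff.mp hval]
        rfl
      rw [if_pos hval, hnone, Option.none_or]
    · rw [if_neg hval]
      exact update_items_get?_or (gsA_nodup dct f p.1) x k

theorem afold_keys (dct : List (Int × List (Int × Int))) (f : Nat) :
    ∀ (ps : List (Int × Int)) (x : PySem.Dict Int (List (Int × Int))),
      (ps.foldl (fun acc p =>
        if (get_subdictFuel dct f p.1).items.isEmpty then acc
        else acc.update (get_subdictFuel dct f p.1).items) x).keys
      = ps.foldl (fun s p => PySem.Set.update s (get_subdictFuel dct f p.1).keys) x.keys := by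
  intro ps
  induction ps with
  | nil => intro x; rfl
  | cons p ps ih =>
    intro x
    rw [List.foldl_cons, ih, List.foldl_cons]
    congr 1
    by_cases hval : (get_subdictFuel dct f p.1).items.isEmpty
    · rw [if_pos hval]
      have : (get_subdictFuel dct f p.1).keys = [] := by
        unfold PySem.Dict.keys
        rw [List.isEmpty_iff.mp hval]
        rfl
      rw [this, PySem.Set.update_nil]
    · rw [if_neg hval]
      have := PySem.Dict.keys_foldl_insert_key (get_subdictFuel dct f p.1).items Prod.fst
        (fun _ q => q.2) x
      calc (x.update (get_subdictFuel dct f p.1).items).keys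
          = (List.foldl (fun d q => d.insert q.1 q.2) x (get_subdictFuel dct f p.1).items).keys := rfl
        _ = PySem.Set.update x.keys ((get_subdictFuel dct f p.1).items.map Prod.fst) := this
        _ = PySem.Set.update x.keys (get_subdictFuel dct f p.1).keys := rfl

theorem kz_update_comm (dct : List (Int × List (Int × Int))) (f : Nat) :
    ∀ (ps : List (Int × Int)) (s t : List Int),
      ps.foldl (fun u p => PySem.Set.update u (get_subdictFuel dct f p.1).keys) (PySem.Set.update s t)
      = PySem.Set.update s (ps.foldl (fun u p => PySem.Set.update u (get_subdictFuel dct f p.1).keys) t) := by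
  intro ps
  induction ps with
  | nil => intro s t; rfl
  | cons p ps ih =>
    intro s t
    rw [List.foldl_cons, List.foldl_cons, ← set_update_assoc, ih]

-- ----- the main simulation: A's cone-merging recursion equals the memoized DFS -----

def SubP (dct : List (Int × List (Int × Int))) (node : Int) (f : Nat) : Prop :=
  ∀ (n : Int) (acc : PySem.Dict Int (List (Int × Int))) (π : List Int),
    subUnvisited dct acc + 1 ≤ f →
    acc.keys.Nodup → SubCorrect dct acc → SubClosed dct acc π → SubGray dct node π n →
    ((subVisit dct f acc n).keys = PySem.Set.update acc.keys (get_subdictFuel dct f n).keys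
    ∧ (∀ k, (subVisit dct f acc n).get? k = Option.or ((get_subdictFuel dct f n).get? k) (acc.get? k))
    ∧ (∀ x, SubReaches dct n x → subIsKey dct x = true → (subVisit dct f acc n).contains x = true))

theorem subMainList (dct : List (Int × List (Int × Int))) (node : Int)
    (f : Nat) (IH : SubP dct node f) :
    ∀ (ps : List (Int × Int)) (acc : PySem.Dict Int (List (Int × Int))) (π' : List Int),
      subUnvisited dct acc + 1 ≤ f → acc.keys.Nodup → SubCorrect dct acc →
      SubClosed dct acc π' → (∀ p ∈ ps, SubGray dct node π' p.1) →
      ((ps.foldl (fun a p => subVisit dct f a p.1) acc).keys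
          = ps.foldl (fun s p => PySem.Set.update s (get_subdictFuel dct f p.1).keys) acc.keys
      ∧ (∀ k, (ps.foldl (fun a p => subVisit dct f a p.1) acc).get? k
          = Option.or (subMerge dct f ps k) (acc.get? k))
      ∧ (∀ p ∈ ps, ∀ x, SubReaches dct p.1 x → subIsKey dct x = true →
          (ps.foldl (fun a p => subVisit dct f a p.1) acc).contains x = true)
      ∧ (∀ k, acc.contains k = true →
          (ps.foldl (fun a p => subVisit dct f a p.1) acc).contains k = true)) := by
  intro ps
  induction ps with
  | nil =>
    intro acc π' _ _ _ _ _
    exact ⟨rfl, fun k => (Option.none_or).symm, fun p hp => absurd hp (List.not_mem_nil), fun k hk => hk⟩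
  | cons p ps ihps =>
    intro acc π' hf hnd hcor hcl hps
    obtain ⟨C1, C2, C3⟩ := IH p.1 acc π' hf hnd hcor hcl (hps p List.mem_cons_self)
    have mono2 : ∀ k, acc.contains k = true → (subVisit dct f acc p.1).contains k = true := by
      intro k hk
      rw [PySem.Dict.contains_iff_mem_keys] at hk ⊢
      rw [C1]
      exact (PySem.Set.mem_update _ _ _).mpr (Or.inl hk)
    have hnd2 : (subVisit dct f acc p.1).keys.Nodup := by
      rw [C1]; exact PySem.Set.nodup_update _ _ hnd
    have hcor2 : SubCorrect dct (subVisit dct f acc p.1) := by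
      intro k hk
      rw [C2 k]
      cases hgs : (get_subdictFuel dct f p.1).get? k with
      | some v =>
        rw [(gsA_get?_row hgs).2]
        rfl
      | none =>
        rw [Option.none_or]
        have hck : acc.contains k = true := by
          rw [PySem.Dict.contains_eq_isSome_get?] at hk ⊢
          rw [C2 k, hgs, Option.none_or] at hk
          exact hk
        exact hcor k hck
    have hcl2 : SubClosed dct (subVisit dct f acc p.1) π' := by
      intro k hk hkπ x hrx hxkey
      have hk' : k ∈ (subVisit dct f acc p.1).keys := (PySem.Dict.contains_iff_mem_keys _ _).mp hk
      rw [C1] at hk'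
      rcases (PySem.Set.mem_update _ _ _).mp hk' with hk' | hk'
      · exact mono2 x (hcl k ((PySem.Dict.contains_iff_mem_keys _ _).mpr hk') hkπ x hrx hxkey)
      · rcases gsA_keys_reach hk' with ⟨hr1, _⟩
        exact C3 x (subReaches_trans hr1 hrx) hxkey
    have hf2 : subUnvisited dct (subVisit dct f acc p.1) + 1 ≤ f := by
      have := subUnvisited_mono (dct := dct) mono2
      omega
    obtain ⟨L1, L2, L3, Lmono⟩ := ihps (subVisit dct f acc p.1) π' hf2 hnd2 hcor2 hcl2
      (fun q hq => hps q (List.mem_cons_of_mem p hq))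
    refine ⟨?_, ?_, ?_, ?_⟩
    · rw [List.foldl_cons, List.foldl_cons, L1, C1]
    · intro k
      rw [List.foldl_cons, L2 k, C2 k,
        show subMerge dct f (p :: ps) k
          = Option.or (subMerge dct f ps k) ((get_subdictFuel dct f p.1).get? k) from rfl,
        Option.or_assoc]
    · intro q hq x hrx hx
      rw [List.foldl_cons]
      rcases List.mem_cons.mp hq with rfl | hq
      · exact Lmono x (C3 x hrx hx)
      · exact L3 q hq x hrx hx
    · intro k hk
      rw [List.foldl_cons]
      exact Lmono k (mono2 k hk)

theorem subMain (dct : List (Int × List (Int × Int))) (node : Int)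
    (hpre : Pre_get_subdict dct node) : ∀ f : Nat, SubP dct node f := by
  intro f
  induction f with
  | zero =>
    intro n acc π hf
    exact absurd hf (by omega)
  | succ f IH =>
    intro n acc π hf hnd hcor hcl hg
    have hnπ : n ∉ π := subGray_not_mem hpre hg
    cases hrow : (PySem.Dict.mk dct).get? n with
    | none =>
      have hv : subVisit dct (f+1) acc n = acc := by simp [subVisit, hrow]
      have hg0 : get_subdictFuel dct (f+1) n = PySem.Dict.empty := by simp [get_subdictFuel, hrow]
      refine ⟨?_, ?_, ?_⟩
      · rw [hv, hg0,
          show (PySem.Dict.empty (κ := Int) (ν := List (Int × Int))).keys = [] from rfl,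
          PySem.Set.update_nil]
      · intro k
        rw [hv, hg0,
          show (PySem.Dict.empty (κ := Int) (ν := List (Int × Int))).get? k = none from rfl,
          Option.none_or]
      · intro x hrx hx
        rcases subReaches_head hrx with rfl | ⟨c, hc, _⟩
        · exfalso; unfold subIsKey at hx; rw [hrow] at hx; cases hx
        · exfalso; unfold subChildren at hc; rw [hrow] at hc; cases hc
    | some row =>
      by_cases hcon : acc.contains n = true
      · have hv : subVisit dct (f+1) acc n = acc := by simp [subVisit, hrow, hcon]
        have hsub : ∀ x ∈ (get_subdictFuel dct (f+1) n).keys, x ∈ acc.keys := by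
          intro x hxk
          rcases gsA_keys_reach hxk with ⟨hr, hk⟩
          exact (PySem.Dict.contains_iff_mem_keys _ _).mp (hcl n hcon hnπ x hr hk)
        refine ⟨?_, ?_, ?_⟩
        · rw [hv, set_update_of_subset hsub]
        · intro k
          rw [hv]
          cases hgs : (get_subdictFuel dct (f+1) n).get? k with
          | none => rw [Option.none_or]
          | some v =>
            obtain ⟨hr, hDk⟩ := gsA_get?_row hgs
            have hkkey : subIsKey dct k = true := by unfold subIsKey; rw [hDk]; rfl
            have hck : acc.contains k = true := hcl n hcon hnπ k hr hkkey
            rw [show Option.or (some v) (acc.get? k) = some v from rfl, hcor k hck, hDk]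
        · intro x hrx hx
          rw [hv]; exact hcl n hcon hnπ x hrx hx
      · replace hcon : acc.contains n = false := by
          cases h : acc.contains n with
          | false => rfl
          | true => exact absurd h hcon
        have hv : subVisit dct (f+1) acc n
            = row.foldl (fun a p => subVisit dct f a p.1) (acc.insert n row) := by
          simp [subVisit, hrow, hcon]
        have hnkey : n ∈ dct.map Prod.fst :=
          subIsKey_mem_fst (by unfold subIsKey; rw [hrow]; rfl)
        have hf1 : subUnvisited dct (acc.insert n row) + 1 ≤ f := by
          have := subUnvisited_insert (dct := dct) (acc := acc) row hnkey hcon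
          omega
        have hnd1 := PySem.Dict.nodup_keys_insert acc n row hnd
        have hcor1 : SubCorrect dct (acc.insert n row) := by
          intro k hk
          by_cases hkn : k = n
          · subst hkn; rw [PySem.Dict.get?_insert_self, hrow]
          · rw [PySem.Dict.get?_insert_of_ne acc row hkn]
            have hk' : acc.contains k = true := by
              rw [PySem.Dict.contains_insert] at hk
              simpa [hkn] using hk
            exact hcor k hk'
        have hcl1 : SubClosed dct (acc.insert n row) (n :: π) := by
          intro k hk hkπ x hrx hx
          by_cases hkn : k = n
          · exact absurd (hkn ▸ List.mem_cons_self) hkπ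
          · have hk' : acc.contains k = true := by
              rw [PySem.Dict.contains_insert] at hk
              simpa [hkn] using hk
            have hkπ' : k ∉ π := fun hm => hkπ (List.mem_cons_of_mem n hm)
            have hax := hcl k hk' hkπ' x hrx hx
            rw [PySem.Dict.contains_insert, hax]
            simp
        have hgray1 : ∀ p ∈ row, SubGray dct node (n :: π) p.1 := by
          intro p hp
          refine ⟨?_, hg⟩
          unfold subChildren; rw [hrow]
          exact List.mem_map.mpr ⟨p, hp, rfl⟩
        obtain ⟨L1, L2, L3, Lmono⟩ := subMainList dct node f IH row (acc.insert n row)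
          (n :: π) hf1 hnd1 hcor1 hcl1 hgray1
        have hgeq : get_subdictFuel dct (f+1) n = row.foldl (fun acc p =>
            if (get_subdictFuel dct f p.1).items.isEmpty then acc
            else acc.update (get_subdictFuel dct f p.1).items)
            (PySem.Dict.empty.insert n row) := by
          simp [get_subdictFuel, hrow]
        have hkeysins : (acc.insert n row).keys = acc.keys ++ [n] :=
          PySem.Dict.keys_insert_of_not_contains acc row hcon
        have hnmem : n ∉ acc.keys := fun hm => by
          rw [(PySem.Dict.contains_iff_mem_keys acc n).mpr hm] at hcon; cases hcon
        have hupd1 : PySem.Set.update acc.keys [n] = acc.keys ++ [n] := by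
          show PySem.Set.add acc.keys n = _
          unfold PySem.Set.add
          simp [hnmem]
        have hinskeys : ((PySem.Dict.empty (κ := Int) (ν := List (Int × Int))).insert n row).keys = [n] := rfl
        refine ⟨?_, ?_, ?_⟩
        · rw [hv, L1, hgeq, afold_keys, hkeysins, ← hupd1, kz_update_comm, hinskeys]
        · intro k
          rw [hv, L2 k, hgeq, afold_get?, Option.or_assoc]
          congr 1
          by_cases hkn : k = n
          · subst hkn
            rw [PySem.Dict.get?_insert_self, PySem.Dict.get?_insert_self]
            rfl
          · rw [PySem.Dict.get?_insert_of_ne acc row hkn,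
              PySem.Dict.get?_insert_of_ne PySem.Dict.empty row hkn,
              show (PySem.Dict.empty (κ := Int) (ν := List (Int × Int))).get? k = none from rfl,
              Option.none_or]
        · intro x hrx hx
          rcases subReaches_head hrx with rfl | ⟨c, hc, hcx⟩
          · rw [hv]; exact Lmono x (PySem.Dict.contains_insert_self acc x row)
          · unfold subChildren at hc; rw [hrow] at hc
            rcases List.mem_map.mp hc with ⟨p, hp, rfl⟩
            rw [hv]; exact L3 p hp x hcx hx

theorem set_ofList_nodup {l : List Int} (h : l.Nodup) : PySem.Set.ofList l = l := by
  induction l using List.reverseRecOn with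
  | nil => rfl
  | append_singleton l a ih =>
    have hnd : l.Nodup := (List.nodup_append.mp h).1
    have hna : a ∉ l := by
      intro hm
      rw [List.nodup_append] at h
      exact h.2.2 a hm a (List.mem_singleton_self a) rfl
    show List.foldl PySem.Set.add [] (l ++ [a]) = l ++ [a]
    rw [List.foldl_append]
    have h1 : List.foldl PySem.Set.add [] l = l := ih hnd
    rw [h1]
    show PySem.Set.add l a = l ++ [a]
    unfold PySem.Set.add
    simp [hna]

-- ----- bridging port B's explicit-stack loop to the memoized DFS -----

-- potential: weight of the dct entries whose key is not yet visited (bounds the pushes left)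
def subPot (dct : List (Int × List (Int × Int))) (acc : PySem.Dict Int (List (Int × Int))) : Nat :=
  ((dct.filter (fun p => !(acc.contains p.1))).map (fun p => p.2.length + 1)).sum

theorem subPot_filter_mono (P Q : (Int × List (Int × Int)) → Bool)
    (h : ∀ p, P p = true → Q p = true) : ∀ (l : List (Int × List (Int × Int))),
    ((l.filter P).map (fun p => p.2.length + 1)).sum ≤ ((l.filter Q).map (fun p => p.2.length + 1)).sum := by
  intro l
  induction l with
  | nil => simp
  | cons q t ih =>
    by_cases hp : P q = true
    · simp only [List.filter_cons, hp, h q hp, if_pos, List.map_cons, List.sum_cons]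
      omega
    · have hp' : P q = false := by cases hP : P q with | true => exact absurd hP hp | false => rfl
      simp only [List.filter_cons]
      cases hq : Q q with
      | false =>
        rw [if_neg (by simp [hp']), if_neg (by simp)]
        exact ih
      | true =>
        rw [if_neg (by simp [hp']), if_pos rfl, List.map_cons, List.sum_cons]
        omega

theorem subPot_insert {dct : List (Int × List (Int × Int))}
    {acc : PySem.Dict Int (List (Int × Int))} {n : Int} {row : List (Int × Int)}
    (hrow : (PySem.Dict.mk dct).get? n = some row) (hnc : acc.contains n = false) :
    subPot dct (acc.insert n row) + (row.length + 1) ≤ subPot dct acc := by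
  have hmem : (n, row) ∈ dct := PySem.Dict.mem_items_of_get?_eq_some _ hrow
  have himp : ∀ p : Int × List (Int × Int),
      (!((acc.insert n row).contains p.1)) = true → (!(acc.contains p.1)) = true := by
    intro p hp
    rw [Bool.not_eq_eq_eq_not, Bool.not_true, PySem.Dict.contains_insert,
      Bool.or_eq_false_iff] at hp
    simp [hp.2]
  unfold subPot
  have aux : ∀ l : List (Int × List (Int × Int)), (n, row) ∈ l →
      ((l.filter (fun p => !((acc.insert n row).contains p.1))).map (fun p => p.2.length + 1)).sum
        + (row.length + 1)
      ≤ ((l.filter (fun p => !(acc.contains p.1))).map (fun p => p.2.length + 1)).sum := by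
    intro l
    induction l with
    | nil => intro h; cases h
    | cons q t ih =>
      intro h
      rcases List.mem_cons.mp h with rfl | hmem'
      · -- head is the (n, row) entry: kept by the old filter, dropped by the new one
        have hold : (!(acc.contains (n, row).1)) = true := by simp [hnc]
        simp only [List.filter_cons]
        rw [if_pos hold, if_neg (by simp), List.map_cons, List.sum_cons]
        have := subPot_filter_mono _ _ himp t
        have hsnd : ((n, row).2).length = row.length := rfl
        omega
      · have := ih hmem'
        by_cases hn : (!((acc.insert n row).contains q.1)) = true
        · simp only [List.filter_cons, hn, himp q hn, if_pos, List.map_cons, List.sum_cons]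
          omega
        · have hn' : (!((acc.insert n row).contains q.1)) = false := by
            cases hN : (!((acc.insert n row).contains q.1)) with
            | true => exact absurd hN hn | false => rfl
          simp only [List.filter_cons]
          cases ho : (!(acc.contains q.1)) with
          | false =>
            rw [if_neg (by simp [hn']), if_neg (by simp)]
            exact this
          | true =>
            rw [if_neg (by simp [hn']), if_pos rfl, List.map_cons, List.sum_cons]
            omega
  exact aux dct hmem

theorem subVisit_contains_mono (dct : List (Int × List (Int × Int))) :
    ∀ (f : Nat) (acc : PySem.Dict Int (List (Int × Int))) (n k : Int),
      acc.contains k = true → (subVisit dct f acc n).contains k = true := by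
  intro f
  induction f with
  | zero => intro acc n k h; exact h
  | succ f ih =>
    intro acc n k h
    show (subVisit dct (f+1) acc n).contains k = true
    simp only [subVisit]
    cases hrow : (PySem.Dict.mk dct).get? n with
    | none => exact h
    | some row =>
      by_cases hc : acc.contains n = true
      · simp [hc, h]
      · have hc' : acc.contains n = false := by
          cases hC : acc.contains n with | true => exact absurd hC hc | false => rfl
        simp only [hc', Bool.false_eq_true, if_false]
        have haux : ∀ (l : List (Int × Int)) (a : PySem.Dict Int (List (Int × Int))),
            a.contains k = true → (l.foldl (fun a p => subVisit dct f a p.1) a).contains k = true := by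
          intro l
          induction l with
          | nil => intro a ha; exact ha
          | cons p t iht => intro a ha; exact iht _ (ih a p.1 k ha)
        exact haux row _ (by rw [PySem.Dict.contains_insert, h]; simp)

theorem subUnvisited_pos {dct : List (Int × List (Int × Int))}
    {acc : PySem.Dict Int (List (Int × Int))} {n : Int} {row : List (Int × Int)}
    (hrow : (PySem.Dict.mk dct).get? n = some row) (hnc : acc.contains n = false) :
    1 ≤ subUnvisited dct acc := by
  have hnkey : n ∈ dct.map Prod.fst :=
    subIsKey_mem_fst (by unfold subIsKey; rw [hrow]; rfl)
  have : n ∈ ((dct.map Prod.fst).toFinset).filter (fun k => acc.contains k = false) :=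
    Finset.mem_filter.mpr ⟨List.mem_toFinset.mpr hnkey, hnc⟩
  exact Finset.card_pos.mpr ⟨n, this⟩

theorem subVisit_fuel_irrel (dct : List (Int × List (Int × Int))) :
    ∀ (u : Nat) (acc : PySem.Dict Int (List (Int × Int))) (n : Int) (f g : Nat),
      subUnvisited dct acc ≤ u → u < f → u < g →
      subVisit dct f acc n = subVisit dct g acc n := by
  intro u
  induction u with
  | zero =>
    intro acc n f g hu hf hg
    obtain ⟨f', rfl⟩ : ∃ f', f = f' + 1 := ⟨f - 1, by omega⟩
    obtain ⟨g', rfl⟩ : ∃ g', g = g' + 1 := ⟨g - 1, by omega⟩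
    simp only [subVisit]
    cases hrow : (PySem.Dict.mk dct).get? n with
    | none => rfl
    | some row =>
      by_cases hc : acc.contains n = true
      · simp [hc]
      · have hc' : acc.contains n = false := by
          cases hC : acc.contains n with | true => exact absurd hC hc | false => rfl
        exact absurd (subUnvisited_pos hrow hc') (by omega)
  | succ u ih =>
    intro acc n f g hu hf hg
    obtain ⟨f', rfl⟩ : ∃ f', f = f' + 1 := ⟨f - 1, by omega⟩
    obtain ⟨g', rfl⟩ : ∃ g', g = g' + 1 := ⟨g - 1, by omega⟩
    simp only [subVisit]
    cases hrow : (PySem.Dict.mk dct).get? n with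
    | none => rfl
    | some row =>
      by_cases hc : acc.contains n = true
      · simp [hc]
      · have hc' : acc.contains n = false := by
          cases hC : acc.contains n with | true => exact absurd hC hc | false => rfl
        simp only [hc', Bool.false_eq_true, if_false]
        have hnkey : n ∈ dct.map Prod.fst :=
          subIsKey_mem_fst (by unfold subIsKey; rw [hrow]; rfl)
        have hins : subUnvisited dct acc = subUnvisited dct (acc.insert n row) + 1 :=
          subUnvisited_insert row hnkey hc'
        have haux : ∀ (l : List (Int × Int)) (a : PySem.Dict Int (List (Int × Int))),
            subUnvisited dct a ≤ u →
            l.foldl (fun a p => subVisit dct f' a p.1) a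
              = l.foldl (fun a p => subVisit dct g' a p.1) a := by
          intro l
          induction l with
          | nil => intro a _; rfl
          | cons p t iht =>
            intro a ha
            simp only [List.foldl_cons]
            rw [ih a p.1 f' g' ha (by omega) (by omega)]
            refine iht _ ?_
            exact le_trans (subUnvisited_mono (fun k hk => subVisit_contains_mono dct g' a p.1 k hk)) ha
        exact haux row _ (by omega)

theorem subStack_eq_foldl (dct : List (Int × List (Int × Int))) :
    ∀ (fS : Nat) (S : List Int) (acc : PySem.Dict Int (List (Int × Int))) (fV : Nat),
      S.length + subPot dct acc < fS → subUnvisited dct acc < fV →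
      subStack dct fS S acc = S.foldl (fun a n => subVisit dct fV a n) acc := by
  intro fS
  induction fS with
  | zero => intro S acc fV h; exact absurd h (by omega)
  | succ fS ih =>
    intro S acc fV hS hV
    obtain ⟨g, rfl⟩ : ∃ g, fV = g + 1 := ⟨fV - 1, by omega⟩
    cases S with
    | nil => rfl
    | cons n S' =>
      rw [List.foldl_cons]
      cases hrow : (PySem.Dict.mk dct).get? n with
      | none =>
        have hstep : subStack dct (fS+1) (n :: S') acc = subStack dct fS S' acc := by
          simp [subStack, hrow]
        have hvis : subVisit dct (g+1) acc n = acc := by simp [subVisit, hrow]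
        rw [hstep, hvis]
        exact ih S' acc (g+1) (by simp only [List.length_cons] at hS; omega) hV
      | some row =>
        by_cases hc : acc.contains n = true
        · have hstep : subStack dct (fS+1) (n :: S') acc = subStack dct fS S' acc := by
            simp [subStack, hrow, hc]
          have hvis : subVisit dct (g+1) acc n = acc := by simp [subVisit, hrow, hc]
          rw [hstep, hvis]
          exact ih S' acc (g+1) (by simp only [List.length_cons] at hS; omega) hV
        · have hc' : acc.contains n = false := by
            cases hC : acc.contains n with | true => exact absurd hC hc | false => rfl
          have hstep : subStack dct (fS+1) (n :: S') acc
              = subStack dct fS (row.map Prod.fst ++ S') (acc.insert n row) := by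
            simp [subStack, hrow, hc']
          rw [hstep]
          have hpot := subPot_insert hrow hc'
          have hnkey : n ∈ dct.map Prod.fst :=
            subIsKey_mem_fst (by unfold subIsKey; rw [hrow]; rfl)
          have hins : subUnvisited dct acc = subUnvisited dct (acc.insert n row) + 1 :=
            subUnvisited_insert row hnkey hc'
          have hS' : (row.map Prod.fst ++ S').length + subPot dct (acc.insert n row) < fS := by
            simp only [List.length_append, List.length_map, List.length_cons] at hS ⊢
            omega
          rw [ih (row.map Prod.fst ++ S') (acc.insert n row) (g+1) hS' (by omega),
            List.foldl_append]
          have hvis : subVisit dct (g+1) acc n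
              = row.foldl (fun a p => subVisit dct g a p.1) (acc.insert n row) := by
            simp [subVisit, hrow, hc']
          rw [hvis]
          congr 1
          rw [List.foldl_map]
          -- swap the child fuel g+1 for g (both adequate after visiting n)
          have haux : ∀ (l : List (Int × Int)) (a : PySem.Dict Int (List (Int × Int))),
              subUnvisited dct a ≤ subUnvisited dct (acc.insert n row) →
              l.foldl (fun a p => subVisit dct (g+1) a p.1) a
                = l.foldl (fun a p => subVisit dct g a p.1) a := by
            intro l
            induction l with
            | nil => intro a _; rfl
            | cons p t iht =>
              intro a ha
              simp only [List.foldl_cons]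
              rw [subVisit_fuel_irrel dct (subUnvisited dct (acc.insert n row)) a p.1 (g+1) g
                ha (by omega) (by omega)]
              refine iht _ ?_
              exact le_trans
                (subUnvisited_mono (fun k hk => subVisit_contains_mono dct g a p.1 k hk)) ha
          exact haux row _ le_rfl

-- ===== VERDICT (by name: the statement is the Claim_ definition above) =====
theorem get_subdict_spec : Claim_equal_get_subdict := by
  unfold Claim_equal_get_subdict
  intro dct node _ hpre
  unfold Spec_get_subdict get_subdict get_subdict_alt
  have hf : subUnvisited dct (PySem.Dict.empty) + 1 ≤ dct.length + 1 := by
    unfold subUnvisited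
    have h1 := Finset.card_filter_le ((dct.map Prod.fst).toFinset)
      (fun k => (PySem.Dict.empty (κ := Int) (ν := List (Int × Int))).contains k = false)
    have h2 := List.toFinset_card_le (dct.map Prod.fst)
    rw [List.length_map] at h2
    omega
  have hpot0 : subPot dct PySem.Dict.empty = (dct.map (fun p => p.2.length + 1)).sum := by
    unfold subPot
    congr 1
    congr 1
    apply List.filter_eq_self.mpr
    intro p _
    rfl
  have hbridge := subStack_eq_foldl dct (subFuel dct) [node] PySem.Dict.empty (dct.length + 1)
    (by simp only [List.length_singleton, subFuel, hpot0]; omega) (by omega)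
  rw [hbridge]
  simp only [List.foldl_cons, List.foldl_nil]
  have hcor : SubCorrect dct PySem.Dict.empty := by
    intro k hk
    rw [show (PySem.Dict.empty (κ := Int) (ν := List (Int × Int))).contains k = false from rfl] at hk
    cases hk
  have hcl : SubClosed dct PySem.Dict.empty [] := by
    intro k hk
    rw [show (PySem.Dict.empty (κ := Int) (ν := List (Int × Int))).contains k = false from rfl] at hk
    cases hk
  obtain ⟨C1, C2, _⟩ := subMain dct node hpre (dct.length + 1) node PySem.Dict.empty []
    hf PySem.Dict.nodup_keys_empty hcor hcl rfl
  have hkeys : (get_subdictFuel dct (dct.length + 1) node).keys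
      = (subVisit dct (dct.length + 1) PySem.Dict.empty node).keys := by
    rw [C1]
    show _ = PySem.Set.ofList (get_subdictFuel dct (dct.length + 1) node).keys
    rw [set_ofList_nodup (gsA_nodup dct _ node)]
  have hget : ∀ k, (get_subdictFuel dct (dct.length + 1) node).get? k
      = (subVisit dct (dct.length + 1) PySem.Dict.empty node).get? k := by
    intro k
    rw [C2 k,
      show (PySem.Dict.empty (κ := Int) (ν := List (Int × Int))).get? k = none from rfl,
      Option.or_none]
  have hndB : (subVisit dct (dct.length + 1) PySem.Dict.empty node).keys.Nodup := by
    rw [← hkeys]; exact gsA_nodup dct _ node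
  rw [PySem.Dict.items_eq_map_keys _ (gsA_nodup dct _ node) [],
    PySem.Dict.items_eq_map_keys _ hndB [], hkeys]
  apply List.map_congr_left
  intro k _
  rw [PySem.Dict.getD_eq_get?_getD, PySem.Dict.getD_eq_get?_getD, hget k]
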